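-- pv_equiv track=rewrite | github.com/martimy/VLSM_IPv4_Address_Planner | old/IPAddressPlan_old.py | __addr_to_str
-- ===== SOURCE A (Python) =====
-- def __addr_to_str(b, m):
--     lst0 = b & 255
--     lst1 = b >> 8 & 255
--     lst2 = b >> 16 & 255
--     lst3 = b >> 24 & 255
--     addr_str = '.'.join(str(i) for i in [lst3, lst2, lst1, lst0])
--     addr_str += '/' + str(m)
--     return addr_str
-- ===== SOURCE B (Python) =====
-- def __addr_to_str(b, m):
--     # B: go through a textual staging: render the low 32 bits as a fixed-width
--     # hex string, then decode consecutive two-character slices as the decimal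
--     # octets. No arithmetic octet extraction at all.
--     h = format(b % 0x100000000, '08x')
--     return '.'.join(str(int(h[i:i + 2], 16)) for i in range(0, 8, 2)) + '/' + str(m)
-- ===== Notes on version B (the rewrite author's own statement) =====
-- stated objective: alternative
-- what changed: Replaces the four arithmetic shift-and-mask octet extractions with a textual staging: render the low 32 bits as a fixed-width 8-digit hex string and decode each two-character slice with int(., 16) to get the octets.
import Mathlib
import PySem

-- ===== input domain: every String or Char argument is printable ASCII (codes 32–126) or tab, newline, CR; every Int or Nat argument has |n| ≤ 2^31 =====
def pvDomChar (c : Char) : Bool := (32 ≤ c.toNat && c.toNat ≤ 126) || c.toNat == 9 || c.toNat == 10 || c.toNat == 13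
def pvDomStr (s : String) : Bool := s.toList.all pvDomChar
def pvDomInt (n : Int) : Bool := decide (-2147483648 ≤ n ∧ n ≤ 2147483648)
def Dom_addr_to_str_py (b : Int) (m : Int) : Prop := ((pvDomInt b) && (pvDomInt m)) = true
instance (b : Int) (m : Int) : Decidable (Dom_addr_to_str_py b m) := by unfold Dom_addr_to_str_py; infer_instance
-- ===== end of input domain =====

-- B replaces A's arithmetic shift/mask octet extraction by a textual staging:
-- render the low 32 bits as a fixed-width hex string, then decode two-character
-- slices with int(.,16) (alternative decomposition, same cost).


-- ===== PORT A =====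
-- literal port of A: four shift/mask extractions, '.'-join, then '/' + str(m)
def addr_to_str_py (b : Int) (m : Int) : String :=
  let lst0 := PySem.Int.band b 255
  let lst1 := PySem.Int.band (b >>> (8 : Nat)) 255
  let lst2 := PySem.Int.band (b >>> (16 : Nat)) 255
  let lst3 := PySem.Int.band (b >>> (24 : Nat)) 255
  let addr_str := PySem.Str.join "." (([lst3, lst2, lst1, lst0]).map PySem.Int.toStr)
  addr_str ++ ("/" ++ PySem.Int.toStr m)

-- ===== PORT B =====
-- hand port of format(x, '08x') for 0 ≤ x < 2^32 (exact there: 8 lowercase hex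
-- digits, leading zeros kept): digit k from the left is x // 16^(7-k) % 16
def pvHexChar (d : Int) : Char :=
  if d < 10 then Char.ofNat (48 + d).toNat else Char.ofNat (87 + d).toNat

def pvHex8 (x : Int) : List Char :=
  (List.range 8).map (fun k => pvHexChar (PySem.Int.mod (PySem.Int.floordiv x ((16:Int) ^ (7 - k))) 16))

-- literal port of B: h = format(b % 2^32, '08x'); '.'.join(str(int(h[i:i+2],16))
-- for i in range(0,8,2)) + '/' + str(m).  int(s,16) is PySem.Int.ofCharsBase?;
-- .getD 0 never fires: every slice is two hex digits, so the parse succeeds.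
def addr_to_str_py_alt (b : Int) (m : Int) : String :=
  let h := pvHex8 (PySem.Int.mod b 4294967296)
  let parts := (PySem.List.pyRange 0 8 2).map (fun i =>
    PySem.Int.toStr ((PySem.Int.ofCharsBase? (PySem.List.slice h (some i) (some (i + 2))) 16).getD 0))
  PySem.Str.join "." parts ++ ("/" ++ PySem.Int.toStr m)

-- ===== PRECONDITION & SPEC =====
def Spec_addr_to_str_py (b : Int) (m : Int) (out : String) : Prop := out = addr_to_str_py_alt b m
instance (b : Int) (m : Int) (out : String) : Decidable (Spec_addr_to_str_py b m out) := by unfold Spec_addr_to_str_py; infer_instance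

-- ===== CLAIM (what is proved, stated in full; the proofs are below) =====
def Claim_equal_addr_to_str_py : Prop := ∀ (b : Int) (m : Int), Dom_addr_to_str_py b m → Spec_addr_to_str_py b m (addr_to_str_py b m)

-- ===== LEMMAS AND PROOFS =====

-- int(·,16) on two of our hex digits gives back 16*d1 + d2
theorem pv_hexPair (d1 d2 : Int) (h1 : 0 ≤ d1 ∧ d1 < 16) (h2 : 0 ≤ d2 ∧ d2 < 16) :
    (PySem.Int.ofCharsBase? [pvHexChar d1, pvHexChar d2] 16).getD 0 = 16 * d1 + d2 := by
  obtain ⟨a1, b1⟩ := h1; obtain ⟨a2, b2⟩ := h2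
  interval_cases d1 <;> interval_cases d2 <;> decide

-- Python's a & 255 is a mod 256 (all integers, two's-complement semantics)
theorem pv_band255 (a : Int) : PySem.Int.band a 255 = PySem.Int.mod a 256 := by
  rw [PySem.Int.mod_eq_emod_of_pos (by norm_num)]
  unfold PySem.Int.band
  norm_num
  split_ifs with h
  · rw [show Int.toNat 255 = 2^8-1 from rfl, Nat.and_two_pow_sub_one_eq_mod a.toNat 8]
    omega
  · rw [show Int.toNat 255 = 2^8-1 from rfl, Nat.and_comm, Nat.and_two_pow_sub_one_eq_mod]
    have h2 : (-a-1).toNat % 2^8 < 2^8 := Nat.mod_lt _ (by norm_num)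
    omega

-- Python's a >> k is floor division by 2^k
theorem pv_shr_eq (a : Int) (k : Nat) : a >>> k = PySem.Int.floordiv a (2 ^ k) := by
  rw [PySem.Int.floordiv_eq_ediv_of_pos (by positivity), Int.shiftRight_eq_div_pow]
  norm_cast

-- B's hex-digit pair (2j, 2j+1) recombines to A's octet: one lemma per pair
theorem pv_pair3 (b : Int) :
    16 * (b % 4294967296 / 268435456 % 16) + b % 4294967296 / 16777216 % 16
      = PySem.Int.band (b >>> (24 : Nat)) 255 := by
  rw [pv_band255, pv_shr_eq,
    PySem.Int.mod_eq_emod_of_pos (b := (256:Int)) (by norm_num),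
    PySem.Int.floordiv_eq_ediv_of_pos (by norm_num : (0:Int) < 2^(24:Nat))]
  norm_num
  omega

theorem pv_pair2 (b : Int) :
    16 * (b % 4294967296 / 1048576 % 16) + b % 4294967296 / 65536 % 16
      = PySem.Int.band (b >>> (16 : Nat)) 255 := by
  rw [pv_band255, pv_shr_eq,
    PySem.Int.mod_eq_emod_of_pos (b := (256:Int)) (by norm_num),
    PySem.Int.floordiv_eq_ediv_of_pos (by norm_num : (0:Int) < 2^(16:Nat))]
  norm_num
  omega

theorem pv_pair1 (b : Int) :
    16 * (b % 4294967296 / 4096 % 16) + b % 4294967296 / 256 % 16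
      = PySem.Int.band (b >>> (8 : Nat)) 255 := by
  rw [pv_band255, pv_shr_eq,
    PySem.Int.mod_eq_emod_of_pos (b := (256:Int)) (by norm_num),
    PySem.Int.floordiv_eq_ediv_of_pos (by norm_num : (0:Int) < 2^(8:Nat))]
  norm_num
  omega

theorem pv_pair0 (b : Int) :
    16 * (b % 4294967296 / 16 % 16) + b % 16
      = PySem.Int.band b 255 := by
  rw [pv_band255, PySem.Int.mod_eq_emod_of_pos (b := (256:Int)) (by norm_num)]
  omega

-- ===== VERDICT (by name: the statement is the Claim_ definition above) =====
theorem addr_to_str_py_spec : Claim_equal_addr_to_str_py := by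
  intro b m _
  unfold Spec_addr_to_str_py addr_to_str_py addr_to_str_py_alt pvHex8
  simp only [show PySem.List.pyRange 0 8 2 = ([0, 2, 4, 6] : List Int) from rfl,
    show List.range 8 = [0, 1, 2, 3, 4, 5, 6, 7] from rfl, List.map]
  norm_num
  simp only [PySem.List.slice, PySem.List.clampIdx, List.length_cons, List.length_nil]
  simp only [show Int.toNat 2 = 2 from rfl, show Int.toNat 4 = 4 from rfl,
    show Int.toNat 6 = 6 from rfl, show Int.toNat 8 = 8 from rfl]
  norm_num [List.take, List.drop]
  rw [pv_hexPair _ _ ⟨Int.emod_nonneg _ (by norm_num), Int.emod_lt_of_pos _ (by norm_num)⟩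
        ⟨Int.emod_nonneg _ (by norm_num), Int.emod_lt_of_pos _ (by norm_num)⟩,
      pv_hexPair _ _ ⟨Int.emod_nonneg _ (by norm_num), Int.emod_lt_of_pos _ (by norm_num)⟩
        ⟨Int.emod_nonneg _ (by norm_num), Int.emod_lt_of_pos _ (by norm_num)⟩,
      pv_hexPair _ _ ⟨Int.emod_nonneg _ (by norm_num), Int.emod_lt_of_pos _ (by norm_num)⟩
        ⟨Int.emod_nonneg _ (by norm_num), Int.emod_lt_of_pos _ (by norm_num)⟩,
      pv_hexPair _ _ ⟨Int.emod_nonneg _ (by norm_num), Int.emod_lt_of_pos _ (by norm_num)⟩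
        ⟨Int.emod_nonneg _ (by norm_num), Int.emod_lt_of_pos _ (by norm_num)⟩]
  rw [pv_pair3, pv_pair2, pv_pair1, pv_pair0]
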